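-- pv_equiv track=rewrite | github.com/pgstudio64/olm | olm/core/catalogue_matcher.py | _rotate_desk_layout
-- ===== SOURCE A (Python) =====
-- def _rotate_desk_layout(
--     dx: int, dy: int, dw: int, dd: int,
--     block_eo: int, block_ns: int, degrees: int,
-- ) -> tuple[int, int, int, int]:
--     """Rotation horaire d'un poste dans un bloc.
--
--     Args:
--         dx, dy: Position relative dans le bloc (orientation 0°).
--         dw, dd: Dimensions du poste.
--         block_eo, block_ns: Dimensions du bloc à orientation 0°.
--         degrees: 90, 180, ou 270.
--
--     Returns:
--         (new_dx, new_dy, new_dw, new_dd) dans le bloc pivoté.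
--     """
--     for _ in range((degrees // 90) % 4):
--         # Rotation 90° horaire : (x, y) → (block_ns - y - dd, x)
--         new_dx = block_ns - dy - dd
--         new_dy = dx
--         new_dw = dd
--         new_dd = dw
--         dx, dy, dw, dd = new_dx, new_dy, new_dw, new_dd
--         block_eo, block_ns = block_ns, block_eo
--     return dx, dy, dw, dd
-- ===== SOURCE B (Python) =====
-- def _rotate_desk_layout(
--     dx: int, dy: int, dw: int, dd: int,
--     block_eo: int, block_ns: int, degrees: int,
-- ) -> tuple[int, int, int, int]:
--     """Closed-form clockwise rotation: dispatch on the quarter-turn count."""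
--     n = (degrees // 90) % 4
--     if n == 1:
--         return (block_ns - dy - dd, dx, dd, dw)
--     if n == 2:
--         return (block_eo - dx - dw, block_ns - dy - dd, dw, dd)
--     if n == 3:
--         return (dy, block_eo - dx - dw, dd, dw)
--     return (dx, dy, dw, dd)
-- ===== Notes on version B (the rewrite author's own statement) =====
-- stated objective: simpler
-- what changed: Replaced the iterative loop of up-to-three single-step rotations (with block-dimension swapping state) by a direct dispatch on n = (degrees // 90) % 4 returning the composed closed-form tuple for each quarter-turn count.
import Mathlib
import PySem

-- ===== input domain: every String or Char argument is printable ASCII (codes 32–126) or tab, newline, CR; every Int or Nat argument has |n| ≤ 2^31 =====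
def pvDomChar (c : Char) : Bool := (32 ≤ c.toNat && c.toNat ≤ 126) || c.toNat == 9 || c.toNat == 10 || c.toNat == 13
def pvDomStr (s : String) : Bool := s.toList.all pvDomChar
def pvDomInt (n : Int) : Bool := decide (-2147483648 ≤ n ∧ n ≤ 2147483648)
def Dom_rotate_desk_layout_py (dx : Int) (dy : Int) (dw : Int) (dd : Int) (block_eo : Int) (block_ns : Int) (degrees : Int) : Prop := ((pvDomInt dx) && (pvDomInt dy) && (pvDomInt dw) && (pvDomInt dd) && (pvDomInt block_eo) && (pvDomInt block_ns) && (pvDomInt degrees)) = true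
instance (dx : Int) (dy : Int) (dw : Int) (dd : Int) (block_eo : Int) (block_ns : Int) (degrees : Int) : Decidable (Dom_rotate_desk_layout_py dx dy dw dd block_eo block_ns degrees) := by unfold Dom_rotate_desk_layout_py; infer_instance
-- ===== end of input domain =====

-- B replaces A's repeated single-step rotation loop with a direct case dispatch on the quarter-turn count n; objective: simpler.


-- ===== PORT A =====
def rotate_desk_layout_py (dx : Int) (dy : Int) (dw : Int) (dd : Int) (block_eo : Int) (block_ns : Int) (degrees : Int) : Int × Int × Int × Int :=
  -- for _ in range((degrees // 90) % 4): single clockwise step, swapping block dims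
  let st := (PySem.List.pyRange 0 (PySem.Int.mod (PySem.Int.floordiv degrees 90) 4) 1).foldl
    (fun (s : Int × Int × Int × Int × Int × Int) _ =>
      let (dx, dy, dw, dd, block_eo, block_ns) := s
      let new_dx := block_ns - dy - dd
      let new_dy := dx
      let new_dw := dd
      let new_dd := dw
      (new_dx, new_dy, new_dw, new_dd, block_ns, block_eo))
    (dx, dy, dw, dd, block_eo, block_ns)
  (st.1, st.2.1, st.2.2.1, st.2.2.2.1)

-- ===== PORT B =====
def rotate_desk_layout_py_alt (dx : Int) (dy : Int) (dw : Int) (dd : Int) (block_eo : Int) (block_ns : Int) (degrees : Int) : Int × Int × Int × Int :=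
  let n := PySem.Int.mod (PySem.Int.floordiv degrees 90) 4
  if n = 1 then (block_ns - dy - dd, dx, dd, dw)
  else if n = 2 then (block_eo - dx - dw, block_ns - dy - dd, dw, dd)
  else if n = 3 then (dy, block_eo - dx - dw, dd, dw)
  else (dx, dy, dw, dd)

-- ===== PRECONDITION & SPEC =====
def Spec_rotate_desk_layout_py (dx : Int) (dy : Int) (dw : Int) (dd : Int) (block_eo : Int) (block_ns : Int) (degrees : Int) (out : Int × Int × Int × Int) : Prop := out = rotate_desk_layout_py_alt dx dy dw dd block_eo block_ns degrees
instance (dx : Int) (dy : Int) (dw : Int) (dd : Int) (block_eo : Int) (block_ns : Int) (degrees : Int) (out : Int × Int × Int × Int) : Decidable (Spec_rotate_desk_layout_py dx dy dw dd block_eo block_ns degrees out) := by unfold Spec_rotate_desk_layout_py; infer_instance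

-- ===== CLAIM (what is proved, stated in full; the proofs are below) =====
def Claim_equal_rotate_desk_layout_py : Prop := ∀ (dx : Int) (dy : Int) (dw : Int) (dd : Int) (block_eo : Int) (block_ns : Int) (degrees : Int), Dom_rotate_desk_layout_py dx dy dw dd block_eo block_ns degrees → Spec_rotate_desk_layout_py dx dy dw dd block_eo block_ns degrees (rotate_desk_layout_py dx dy dw dd block_eo block_ns degrees)

-- ===== LEMMAS AND PROOFS =====

-- ===== VERDICT (by name: the statement is the Claim_ definition above) =====
lemma pv_n_cases (d : Int) :
    PySem.Int.mod (PySem.Int.floordiv d 90) 4 = 0 ∨ PySem.Int.mod (PySem.Int.floordiv d 90) 4 = 1 ∨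
    PySem.Int.mod (PySem.Int.floordiv d 90) 4 = 2 ∨ PySem.Int.mod (PySem.Int.floordiv d 90) 4 = 3 := by
  have h1 := PySem.Int.mod_nonneg (PySem.Int.floordiv d 90) (b := 4) (by norm_num)
  have h2 := PySem.Int.mod_lt (PySem.Int.floordiv d 90) (b := 4) (by norm_num)
  omega

theorem rotate_desk_layout_py_spec : Claim_equal_rotate_desk_layout_py := by
  intro dx dy dw dd block_eo block_ns degrees _
  unfold Spec_rotate_desk_layout_py rotate_desk_layout_py rotate_desk_layout_py_alt
  rcases pv_n_cases degrees with h | h | h | h <;>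
    simp only [h] <;>
    norm_num [PySem.List.pyRange_one_cons, PySem.List.pyRange_one_eq_nil, List.foldl] <;> omega
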